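-- pv_equiv track=rewrite | github.com/AdvancedPhotonSource/GSAS-II | GSASIIIO.py | MakePWDRfilename
-- ===== SOURCE A (Python) =====
-- def MakePWDRfilename(hist):
--     '''Make a filename root (no extension) from a PWDR histogram name
--
--     :param str hist: the histogram name in data tree (starts with "PWDR ")
--     '''
--     file0 = ''
--     file1 = hist[5:]
--     # replace repeated blanks
--     while file1 != file0:
--         file0 = file1
--         file1 = file0.replace('  ',' ').strip()
--     file0 = file1.replace('Azm= ','A')
--     # if angle has unneeded decimal places on aziumuth, remove them
--     if file0[-3:] == '.00': file0 = file0[:-3]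
--     file0 = file0.replace('.','_')
--     file0 = file0.replace(' ','_')
--     return file0
-- ===== SOURCE B (Python) =====
-- def MakePWDRfilename(hist):
--     '''Make a filename root (no extension) from a PWDR histogram name
--
--     :param str hist: the histogram name in data tree (starts with "PWDR ")
--     '''
--     # collapse runs of blanks in one pass: split on ' ', drop empty pieces, rejoin
--     root = ' '.join(p for p in hist[5:].split(' ') if p).strip()
--     root = root.replace('Azm= ', 'A')
--     if root.endswith('.00'):
--         root = root[:-3]
--     return root.replace('.', '_').replace(' ', '_')
-- ===== Notes on version B (the rewrite author's own statement) =====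
-- stated objective: idiomatic
-- what changed: The fixpoint while-loop that repeatedly collapses double blanks and strips until the string stops changing is replaced by a single split-on-blank / drop-empty-pieces / rejoin pass followed by one strip; the Azm=, trailing-.00, dot and blank replacements are kept unchanged.
import Mathlib
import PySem

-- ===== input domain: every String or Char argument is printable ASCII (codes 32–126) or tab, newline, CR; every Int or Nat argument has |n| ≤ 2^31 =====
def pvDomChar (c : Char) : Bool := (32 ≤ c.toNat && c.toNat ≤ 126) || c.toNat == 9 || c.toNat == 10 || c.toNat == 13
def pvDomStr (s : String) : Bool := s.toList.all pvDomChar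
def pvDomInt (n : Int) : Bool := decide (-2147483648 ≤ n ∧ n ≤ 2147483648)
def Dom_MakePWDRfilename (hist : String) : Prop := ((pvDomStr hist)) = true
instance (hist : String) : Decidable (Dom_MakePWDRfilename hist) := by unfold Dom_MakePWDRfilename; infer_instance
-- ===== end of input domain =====

-- B replaces A's fixpoint while-loop (repeat replace('  ',' ').strip() until unchanged) by a single
-- split-on-space / drop-empty / rejoin pass plus one strip; the tail transformations are unchanged (idiomatic).

-- ===== PORT A =====

-- one iteration of A's while-loop body: file0.replace('  ',' ').strip()
def pvStepA (s : List Char) : List Char :=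
  PySem.Chars.strip (PySem.Chars.replace s "  ".toList " ".toList)

-- termination facts for the while-loop (cited by pvLoopA's decreasing_by)
theorem pvGo_or (fuel : Nat) (l acc : List Char) :
    PySem.Chars.replace.go "  ".toList " ".toList fuel l acc = acc.reverse ++ l ∨
      (PySem.Chars.replace.go "  ".toList " ".toList fuel l acc).length < acc.length + l.length := by
  induction fuel generalizing l acc with
  | zero => left; rw [PySem.Chars.replace.go.eq_def]
  | succ n ih =>
    cases l with
    | nil => left; rw [PySem.Chars.replace.go.eq_def]; simp
    | cons c t =>
      rw [PySem.Chars.replace.go.eq_def]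
      simp only [List.isPrefixOf_iff_prefix]
      by_cases hp : "  ".toList <+: (c :: t)
      · rw [if_pos hp]
        obtain ⟨rest, hrest⟩ := hp
        have hc : c = ' ' ∧ t = ' ' :: rest := by
          have : "  ".toList = [' ', ' '] := by decide
          rw [this] at hrest
          simp at hrest; exact ⟨hrest.1.symm, hrest.2.symm⟩
        right
        rcases ih (List.drop ("  ".toList).length (c :: t)) (" ".toList.reverse ++ acc) with h | h
        · rw [h]
          have hd : List.drop ("  ".toList).length (c :: t) = rest := by
            rw [hc.1, hc.2]; rfl
          rw [hd]
          simp [hc.2]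
        · calc _ < (" ".toList.reverse ++ acc).length +
                    (List.drop ("  ".toList).length (c :: t)).length := h
            _ ≤ _ := by
              have hd : List.drop ("  ".toList).length (c :: t) = rest := by
                rw [hc.1, hc.2]; rfl
              rw [hd]; simp [hc.2]; omega
      · rw [if_neg hp]
        rcases ih t (c :: acc) with h | h
        · left; rw [h]; simp
        · right; calc _ < (c :: acc).length + t.length := h
            _ ≤ _ := by simp; omega

theorem pvReplace_or (s : List Char) :
    PySem.Chars.replace s "  ".toList " ".toList = s ∨
      (PySem.Chars.replace s "  ".toList " ".toList).length < s.length := by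
  have hne : ("  ".toList).isEmpty = false := by decide
  rw [PySem.Chars.replace, hne]
  simpa using pvGo_or s.length s []

theorem pvLstrip_len (x : List Char) : (PySem.Chars.lstrip x).length ≤ x.length :=
  List.length_dropWhile_le _ _

theorem pvRstrip_len (x : List Char) : (PySem.Chars.rstrip x).length ≤ x.length := by
  rw [PySem.Chars.rstrip]
  simpa using List.length_dropWhile_le PySem.Chars.isspace x.reverse

theorem pvStrip_len (x : List Char) : (PySem.Chars.strip x).length ≤ x.length :=
  le_trans (pvRstrip_len _) (pvLstrip_len _)

theorem pvLstrip_eq_of_len (x : List Char) (h : (PySem.Chars.lstrip x).length = x.length) :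
    PySem.Chars.lstrip x = x :=
  (List.dropWhile_suffix _).eq_of_length h

theorem pvRstrip_eq_of_len (x : List Char) (h : (PySem.Chars.rstrip x).length = x.length) :
    PySem.Chars.rstrip x = x := by
  rw [PySem.Chars.rstrip] at h ⊢
  have h2 : (List.dropWhile PySem.Chars.isspace x.reverse).length = x.reverse.length := by
    simpa using h
  have := (List.dropWhile_suffix (l := x.reverse) PySem.Chars.isspace).eq_of_length h2
  rw [this]; simp

theorem pvStrip_eq_of_len (x : List Char) (h : (PySem.Chars.strip x).length = x.length) :
    PySem.Chars.strip x = x := by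
  rw [PySem.Chars.strip] at h ⊢
  have h1 : (PySem.Chars.lstrip x).length = x.length :=
    le_antisymm (pvLstrip_len x) (by calc x.length = _ := h.symm
                                        _ ≤ _ := pvRstrip_len _)
  rw [pvLstrip_eq_of_len x h1] at h ⊢
  exact pvRstrip_eq_of_len x h

theorem pvStepA_len (s : List Char) : (pvStepA s).length ≤ s.length := by
  rw [pvStepA]
  rcases pvReplace_or s with h | h
  · rw [h]; exact pvStrip_len s
  · exact le_trans (pvStrip_len _) (le_of_lt h)

theorem pvStepA_lt (s : List Char) (h : pvStepA s ≠ s) : (pvStepA s).length < s.length := by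
  rcases lt_or_eq_of_le (pvStepA_len s) with hlt | heq
  · exact hlt
  · exfalso; apply h
    rw [pvStepA] at heq ⊢
    rcases pvReplace_or s with h2 | h2
    · rw [h2] at heq ⊢; exact pvStrip_eq_of_len s heq
    · have h3 := lt_of_le_of_lt (pvStrip_len (PySem.Chars.replace s "  ".toList " ".toList)) h2
      omega

-- the while-loop: while file1 != file0: file0 = file1; file1 = file0.replace('  ',' ').strip()
def pvLoopA (file0 file1 : List Char) : List Char :=
  if file1 = file0 then file1
  else pvLoopA file1 (pvStepA file1)
termination_by 2 * file1.length + (if file1 = file0 then 0 else 1)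
decreasing_by
  rename_i hne
  have hle := pvStepA_len file1
  by_cases hfix : pvStepA file1 = file1
  · rw [if_pos hfix, if_neg hne]; omega
  · have h1 := pvStepA_lt file1 hfix
    rw [if_neg hfix, if_neg hne]; omega

def MakePWDRfilename (hist : String) : String :=
  let file1 := PySem.Chars.slice hist.toList (some 5) none
  let file1 := pvLoopA [] file1
  let file0 := PySem.Chars.replace file1 "Azm= ".toList "A".toList
  let file0 := if PySem.Chars.slice file0 (some (-3)) none = ".00".toList
               then PySem.Chars.slice file0 none (some (-3)) else file0
  let file0 := PySem.Chars.replace file0 ".".toList "_".toList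
  String.ofList (PySem.Chars.replace file0 " ".toList "_".toList)

-- ===== PORT B =====

def MakePWDRfilename_alt (hist : String) : String :=
  let root := PySem.Chars.strip (PySem.Chars.join " ".toList
      ((PySem.Chars.splitOn (PySem.Chars.slice hist.toList (some 5) none) " ".toList).filter
        (fun p => !p.isEmpty)))
  let root := PySem.Chars.replace root "Azm= ".toList "A".toList
  let root := if PySem.Chars.endswith root ".00".toList
              then PySem.Chars.slice root none (some (-3)) else root
  String.ofList (PySem.Chars.replace (PySem.Chars.replace root ".".toList "_".toList) " ".toList "_".toList)

-- ===== PRECONDITION & SPEC =====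
def Spec_MakePWDRfilename (hist : String) (out : String) : Prop := out = MakePWDRfilename_alt hist
instance (hist : String) (out : String) : Decidable (Spec_MakePWDRfilename hist out) := by unfold Spec_MakePWDRfilename; infer_instance

-- ===== CLAIM (what is proved, stated in full; the proofs are below) =====
def Claim_equal_MakePWDRfilename : Prop := ∀ (hist : String), Dom_MakePWDRfilename hist → Spec_MakePWDRfilename hist (MakePWDRfilename hist)

-- ===== LEMMAS AND PROOFS =====

-- spec-side recursions for Python's replace('  ',' ') and split(' ')
def pvRepl2 : List Char → List Char
  | [] => []
  | c :: t =>
    if c = ' ' ∧ t.head? = some ' ' then ' ' :: pvRepl2 t.tail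
    else c :: pvRepl2 t
termination_by s => s.length
decreasing_by all_goals (cases t <;> simp_all)

def pvSplit1 : List Char → List (List Char)
  | [] => [[]]
  | c :: t =>
    if c = ' ' then [] :: pvSplit1 t
    else match pvSplit1 t with
      | [] => [[c]]
      | h :: r => (c :: h) :: r

-- tokens and the common normal form
def pvF (s : List Char) : List (List Char) := (pvSplit1 s).filter (fun p => !p.isEmpty)
def pvJ (L : List (List Char)) : List Char := PySem.Chars.join " ".toList L
def pvPhi (s : List Char) : List Char := pvJ (pvF s)
def pvNF (s : List Char) : List Char := PySem.Chars.strip (pvPhi s)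

theorem pvSplit1_ne_nil (s : List Char) : pvSplit1 s ≠ [] := by
  cases s with
  | nil => simp [pvSplit1]
  | cons c t =>
    rw [pvSplit1]
    split
    · simp
    · split <;> simp

-- bridges: PySem primitives = spec-side recursions
theorem pvGo_repl2 (fuel : Nat) (l acc : List Char) (hf : l.length ≤ fuel) :
    PySem.Chars.replace.go "  ".toList " ".toList fuel l acc = acc.reverse ++ pvRepl2 l := by
  induction fuel generalizing l acc with
  | zero =>
    have : l = [] := by cases l <;> simp_all
    subst this
    rw [PySem.Chars.replace.go.eq_def]; simp [pvRepl2]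
  | succ n ih =>
    cases l with
    | nil => rw [PySem.Chars.replace.go.eq_def]; simp [pvRepl2]
    | cons c t =>
      rw [PySem.Chars.replace.go.eq_def]
      simp only [List.isPrefixOf_iff_prefix]
      by_cases hp : "  ".toList <+: (c :: t)
      · rw [if_pos hp]
        obtain ⟨rest, hrest⟩ := hp
        have h2 : ("  ".toList : List Char) = [' ', ' '] := by decide
        rw [h2] at hrest
        simp only [List.cons_append, List.nil_append, List.cons.injEq] at hrest
        obtain ⟨hc, ht⟩ := hrest
        subst hc; subst ht
        have hd : List.drop ("  ".toList).length (' ' :: ' ' :: rest) = rest := rfl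
        rw [hd, ih rest (" ".toList.reverse ++ acc) (by simp at hf; omega)]
        rw [pvRepl2]
        rw [if_pos (by simp)]
        simp
      · rw [if_neg hp]
        rw [ih t (c :: acc) (by simp at hf; omega)]
        rw [pvRepl2]
        have hcond : ¬ (c = ' ' ∧ t.head? = some ' ') := by
          intro ⟨h1, h2⟩
          apply hp
          cases t with
          | nil => simp at h2
          | cons d u =>
            simp at h2
            subst h1; subst h2
            refine ⟨u, ?_⟩
            have h3 : ("  ".toList : List Char) = [' ', ' '] := by decide
            rw [h3]; rfl
        rw [if_neg hcond]; simp

theorem pvReplace_eq_repl2 (s : List Char) :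
    PySem.Chars.replace s "  ".toList " ".toList = pvRepl2 s := by
  have hne : ("  ".toList).isEmpty = false := by decide
  rw [PySem.Chars.replace, hne]
  simpa using pvGo_repl2 s.length s [] (le_refl _)

theorem pvGo_split1 (fuel : Nat) (l cur : List Char) (acc : List (List Char)) (hf : l.length < fuel) :
    PySem.Chars.splitOn.go " ".toList fuel l cur acc =
      acc.reverse ++ (pvSplit1 l).modifyHead (cur.reverse ++ ·) := by
  induction fuel generalizing l cur acc with
  | zero => omega
  | succ n ih =>
    cases l with
    | nil => rw [PySem.Chars.splitOn.go.eq_def]; simp [pvSplit1]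
    | cons c t =>
      rw [PySem.Chars.splitOn.go.eq_def]
      simp only [List.isPrefixOf_iff_prefix]
      by_cases hp : " ".toList <+: (c :: t)
      · rw [if_pos hp]
        obtain ⟨rest, hrest⟩ := hp
        have h2 : (" ".toList : List Char) = [' '] := by decide
        rw [h2] at hrest
        simp only [List.cons_append, List.nil_append, List.cons.injEq] at hrest
        obtain ⟨hc, ht⟩ := hrest
        subst hc
        have hd : List.drop (" ".toList).length (' ' :: t) = t := by rfl
        rw [hd, ih t [] (cur.reverse :: acc) (by simp at hf; omega)]
        rw [pvSplit1, if_pos rfl]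
        rcases hsp : pvSplit1 t with _ | ⟨h, r⟩
        · exact absurd hsp (pvSplit1_ne_nil t)
        · simp
      · rw [if_neg hp]
        have hc : ¬ (c = ' ') := by
          intro h; subst h
          refine hp ⟨t, ?_⟩
          have h3 : (" ".toList : List Char) = [' '] := by decide
          rw [h3]; rfl
        rw [ih t (c :: cur) acc (by simp at hf; omega)]
        rw [pvSplit1, if_neg hc]
        rcases hsp : pvSplit1 t with _ | ⟨h, r⟩
        · exact absurd hsp (pvSplit1_ne_nil t)
        · simp

theorem pvSplitOn_eq_split1 (s : List Char) :
    PySem.Chars.splitOn s " ".toList = pvSplit1 s := by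
  rw [PySem.Chars.splitOn, pvGo_split1 (s.length + 1) s [] [] (by omega)]
  rcases hsp : pvSplit1 s with _ | ⟨h, r⟩
  · exact absurd hsp (pvSplit1_ne_nil s)
  · simp

-- join basics
theorem pvJ_nil : pvJ [] = [] := by simp [pvJ, PySem.Chars.join, List.intercalate]

theorem pvJ_single (a : List Char) : pvJ [a] = a := by
  simp [pvJ, PySem.Chars.join, List.intercalate]

theorem pvJ_cons_cons (a b : List Char) (L : List (List Char)) :
    pvJ (a :: b :: L) = a ++ ' ' :: pvJ (b :: L) := by
  rw [pvJ, pvJ, PySem.Chars.join_cons_cons]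
  have h : (" ".toList : List Char) = [' '] := by decide
  rw [h]; simp

theorem pvJ_cons_head (c : Char) (X : List Char) (L : List (List Char)) :
    pvJ ((c :: X) :: L) = c :: pvJ (X :: L) := by
  cases L with
  | nil => rw [pvJ_single, pvJ_single]
  | cons b L' => rw [pvJ_cons_cons, pvJ_cons_cons]; simp

-- split1 structure
theorem pvSplit1_cons_space (t : List Char) : pvSplit1 (' ' :: t) = [] :: pvSplit1 t := by
  rw [pvSplit1, if_pos rfl]

theorem pvSplit1_cons_ne (c : Char) (t : List Char) (hc : ¬ c = ' ') :
    pvSplit1 (c :: t) = (c :: (pvSplit1 t).headI) :: (pvSplit1 t).tail := by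
  rw [pvSplit1, if_neg hc]
  rcases hsp : pvSplit1 t with _ | ⟨h, r⟩
  · exact absurd hsp (pvSplit1_ne_nil t)
  · simp

theorem pvPairFilter (q : List Char → Bool) (x y : List (List Char))
    (hx : x ≠ []) (hy : y ≠ []) (hh : x.headI = y.headI)
    (ht : x.tail.filter q = y.tail.filter q) : x.filter q = y.filter q := by
  cases x with
  | nil => exact absurd rfl hx
  | cons a x' =>
    cases y with
    | nil => exact absurd rfl hy
    | cons b y' =>
      simp at hh ht
      subst hh
      simp [List.filter_cons, ht]

-- K1: the token list is invariant under one replace('  ',' ') pass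
theorem pvSplit1_repl2_pair (s : List Char) :
    (pvSplit1 (pvRepl2 s)).headI = (pvSplit1 s).headI ∧
      ((pvSplit1 (pvRepl2 s)).tail).filter (fun p => !p.isEmpty) =
        ((pvSplit1 s).tail).filter (fun p => !p.isEmpty) := by
  induction s using pvRepl2.induct with
  | case1 => simp [pvRepl2]
  | case2 c t h ih =>
    obtain ⟨hc, hh⟩ := h
    subst hc
    cases t with
    | nil => simp at hh
    | cons d u =>
      simp at hh
      subst hh
      simp only [List.tail_cons] at ih
      have hfu : (pvSplit1 (pvRepl2 u)).filter (fun p => !p.isEmpty) =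
          (pvSplit1 u).filter (fun p => !p.isEmpty) :=
        pvPairFilter _ _ _ (pvSplit1_ne_nil _) (pvSplit1_ne_nil _) ih.1 ih.2
      rw [pvRepl2, if_pos (by simp)]
      simp only [List.tail_cons]
      rw [pvSplit1_cons_space, pvSplit1_cons_space, pvSplit1_cons_space]
      constructor
      · rfl
      · simp only [List.tail_cons]
        simpa using hfu
  | case3 c t h ih =>
    have hfu : (pvSplit1 (pvRepl2 t)).filter (fun p => !p.isEmpty) =
        (pvSplit1 t).filter (fun p => !p.isEmpty) :=
      pvPairFilter _ _ _ (pvSplit1_ne_nil _) (pvSplit1_ne_nil _) ih.1 ih.2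
    rw [pvRepl2, if_neg h]
    by_cases hc : c = ' '
    · subst hc
      rw [pvSplit1_cons_space, pvSplit1_cons_space]
      exact ⟨rfl, by simpa using hfu⟩
    · rw [pvSplit1_cons_ne c _ hc, pvSplit1_cons_ne c t hc]
      exact ⟨by rw [ih.1]; simp, by simpa using ih.2⟩

theorem pvF_repl2 (s : List Char) : pvF (pvRepl2 s) = pvF s := by
  have h := pvSplit1_repl2_pair s
  exact pvPairFilter _ _ _ (pvSplit1_ne_nil _) (pvSplit1_ne_nil _) h.1 h.2

theorem pvPhi_repl2 (s : List Char) : pvPhi (pvRepl2 s) = pvPhi s := by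
  rw [pvPhi, pvPhi, pvF_repl2]

-- strip toolkit
theorem pvLstrip_cons (c : Char) (t : List Char) :
    PySem.Chars.lstrip (c :: t) =
      if PySem.Chars.isspace c then PySem.Chars.lstrip t else c :: t := by
  simp only [PySem.Chars.lstrip, List.dropWhile_cons]

theorem pvRstrip_cons (c : Char) (t : List Char) :
    PySem.Chars.rstrip (c :: t) =
      if (PySem.Chars.rstrip t).isEmpty then (if PySem.Chars.isspace c then [] else [c])
      else c :: PySem.Chars.rstrip t := by
  rw [PySem.Chars.rstrip, PySem.Chars.rstrip]
  rw [show (c :: t).reverse = t.reverse ++ [c] by simp]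
  rw [List.dropWhile_append]
  by_cases he : (List.dropWhile PySem.Chars.isspace t.reverse).isEmpty
  · rw [if_pos he]
    have he2 : ((List.dropWhile PySem.Chars.isspace t.reverse).reverse).isEmpty = true := by
      simpa using he
    rw [if_pos he2, List.dropWhile_cons]
    by_cases hc : PySem.Chars.isspace c
    · rw [if_pos hc]; simp [hc]
    · rw [if_neg hc]; simp [hc]
  · rw [if_neg he]
    have he2 : ¬ ((List.dropWhile PySem.Chars.isspace t.reverse).reverse).isEmpty = true := by
      simpa using he
    rw [if_neg he2]
    simp

theorem pvLstrip_rstrip_comm (s : List Char) :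
    PySem.Chars.lstrip (PySem.Chars.rstrip s) = PySem.Chars.rstrip (PySem.Chars.lstrip s) := by
  induction s with
  | nil => rfl
  | cons c t ih =>
    by_cases hsp : PySem.Chars.isspace c
    · rw [pvLstrip_cons, if_pos hsp, ← ih, pvRstrip_cons]
      by_cases he : (PySem.Chars.rstrip t).isEmpty
      · rw [if_pos he, if_pos hsp]
        have h0 : PySem.Chars.rstrip t = [] := by simpa using he
        rw [h0]
      · rw [if_neg he, pvLstrip_cons, if_pos hsp]
    · rw [pvLstrip_cons, if_neg hsp, pvRstrip_cons]
      by_cases he : (PySem.Chars.rstrip t).isEmpty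
      · rw [if_pos he, if_neg hsp, pvLstrip_cons, if_neg hsp]
      · rw [if_neg he, pvLstrip_cons, if_neg hsp]

theorem pvLstrip_reverse (s : List Char) :
    PySem.Chars.lstrip s.reverse = (PySem.Chars.rstrip s).reverse := by
  rw [PySem.Chars.rstrip, PySem.Chars.lstrip, List.reverse_reverse]

theorem pvRstrip_reverse (s : List Char) :
    PySem.Chars.rstrip s.reverse = (PySem.Chars.lstrip s).reverse := by
  rw [PySem.Chars.rstrip, PySem.Chars.lstrip, List.reverse_reverse]

theorem pvStrip_reverse (s : List Char) :
    PySem.Chars.strip s.reverse = (PySem.Chars.strip s).reverse := by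
  rw [PySem.Chars.strip, PySem.Chars.strip, pvLstrip_reverse, pvRstrip_reverse,
    pvLstrip_rstrip_comm]

-- reversal toolkit for split1 / join
def pvMlast (f : List Char → List Char) : List (List Char) → List (List Char)
  | [] => []
  | [h] => [f h]
  | h :: r => h :: pvMlast f r

theorem pvMlast_append (f : List Char → List Char) (L : List (List Char)) (a : List Char) :
    pvMlast f (L ++ [a]) = L ++ [f a] := by
  induction L with
  | nil => rfl
  | cons h r ih =>
    cases r with
    | nil => rfl
    | cons h2 r2 =>
      have h1 : pvMlast f ((h :: h2 :: r2) ++ [a]) = h :: pvMlast f ((h2 :: r2) ++ [a]) := rfl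
      rw [h1, ih]; rfl

theorem pvSplit1_append_space (x : List Char) :
    pvSplit1 (x ++ [' ']) = pvSplit1 x ++ [[]] := by
  induction x with
  | nil => rfl
  | cons c t ih =>
    by_cases hc : c = ' '
    · subst hc
      rw [List.cons_append, pvSplit1_cons_space, pvSplit1_cons_space, ih]
      rfl
    · rw [List.cons_append, pvSplit1_cons_ne c _ hc, pvSplit1_cons_ne c _ hc, ih]
      rcases hsp : pvSplit1 t with _ | ⟨h, r⟩
      · exact absurd hsp (pvSplit1_ne_nil t)
      · simp

theorem pvSplit1_append_ne (x : List Char) (c : Char) (hc : ¬ c = ' ') :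
    pvSplit1 (x ++ [c]) = pvMlast (· ++ [c]) (pvSplit1 x) := by
  induction x with
  | nil =>
    rw [List.nil_append, pvSplit1_cons_ne c _ hc]
    rfl
  | cons d t ih =>
    by_cases hd : d = ' '
    · subst hd
      rw [List.cons_append, pvSplit1_cons_space, pvSplit1_cons_space, ih]
      rcases hsp : pvSplit1 t with _ | ⟨h, r⟩
      · exact absurd hsp (pvSplit1_ne_nil t)
      · rfl
    · rw [List.cons_append, pvSplit1_cons_ne d _ hd, pvSplit1_cons_ne d _ hd, ih]
      rcases hsp : pvSplit1 t with _ | ⟨h, r⟩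
      · exact absurd hsp (pvSplit1_ne_nil t)
      · cases r with
        | nil => rfl
        | cons h2 r2 => rfl

theorem pvSplit1_reverse (s : List Char) :
    pvSplit1 s.reverse = ((pvSplit1 s).map List.reverse).reverse := by
  induction s with
  | nil => rfl
  | cons c t ih =>
    rw [show (c :: t).reverse = t.reverse ++ [c] by simp]
    by_cases hc : c = ' '
    · subst hc
      rw [pvSplit1_append_space, ih, pvSplit1_cons_space]
      simp
    · rw [pvSplit1_append_ne _ c hc, ih, pvSplit1_cons_ne c _ hc]
      rcases hsp : pvSplit1 t with _ | ⟨h, r⟩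
      · exact absurd hsp (pvSplit1_ne_nil t)
      · simp only [List.map_cons, List.reverse_cons, List.headI, List.tail_cons]
        rw [pvMlast_append]

theorem pvJ_append_last (L : List (List Char)) (x : List Char) (hL : L ≠ []) :
    pvJ (L ++ [x]) = pvJ L ++ ' ' :: x := by
  induction L with
  | nil => exact absurd rfl hL
  | cons a L' ih =>
    cases L' with
    | nil => simp [pvJ_cons_cons, pvJ_single]
    | cons b L'' =>
      have h1 : (a :: b :: L'') ++ [x] = a :: ((b :: L'') ++ [x]) := rfl
      have h2 : (b :: L'') ++ [x] = b :: (L'' ++ [x]) := rfl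
      rw [h1, h2, pvJ_cons_cons, ← h2, ih (by simp), pvJ_cons_cons]
      simp

theorem pvJ_reverse (M : List (List Char)) :
    pvJ ((M.map List.reverse).reverse) = (pvJ M).reverse := by
  induction M with
  | nil => rw [pvJ_nil]; rfl
  | cons a M' ih =>
    cases M' with
    | nil => simp only [List.map_cons, List.map_nil, List.reverse_cons, List.reverse_nil,
        List.nil_append]; rw [pvJ_single, pvJ_single]
    | cons b M'' =>
      rw [pvJ_cons_cons]
      simp only [List.map_cons, List.reverse_cons]
      rw [show ((M''.map List.reverse).reverse ++ [b.reverse]) ++ [a.reverse] =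
        ((b :: M'').map List.reverse).reverse ++ [a.reverse] by simp]
      rw [pvJ_append_last _ _ (by simp), ih]
      simp

theorem pvPhi_reverse (s : List Char) : pvPhi s.reverse = (pvPhi s).reverse := by
  rw [pvPhi, pvPhi, pvF, pvF, pvSplit1_reverse, List.filter_reverse, List.filter_map]
  rw [show ((fun p => !p.isEmpty) ∘ List.reverse) = (fun p : List Char => !p.isEmpty) by
    funext p; cases p <;> simp]
  exact pvJ_reverse _

-- pvF on cons
theorem pvF_cons_space (t : List Char) : pvF (' ' :: t) = pvF t := by
  rw [pvF, pvSplit1_cons_space, List.filter_cons]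
  simp [pvF]

theorem pvF_cons_ne (c : Char) (t : List Char) (hc : ¬ c = ' ') :
    pvF (c :: t) = (c :: (pvSplit1 t).headI) ::
      List.filter (fun p => !p.isEmpty) (pvSplit1 t).tail := by
  rw [pvF, pvSplit1_cons_ne c t hc, List.filter_cons]
  simp

theorem pvSplit1_decomp (s : List Char) :
    pvSplit1 s = (pvSplit1 s).headI :: (pvSplit1 s).tail := by
  rcases hsp : pvSplit1 s with _ | ⟨h, r⟩
  · exact absurd hsp (pvSplit1_ne_nil s)
  · rfl

theorem pvF_eq_of_headI_nil (t : List Char) (h : (pvSplit1 t).headI = []) :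
    pvF t = List.filter (fun p => !p.isEmpty) (pvSplit1 t).tail := by
  rw [pvF]
  conv_lhs => rw [pvSplit1_decomp t]
  rw [h, List.filter_cons]
  simp

theorem pvF_eq_of_headI_cons (t : List Char) (x : Char) (xs : List Char)
    (h : (pvSplit1 t).headI = x :: xs) :
    pvF t = (x :: xs) :: List.filter (fun p => !p.isEmpty) (pvSplit1 t).tail := by
  rw [pvF]
  conv_lhs => rw [pvSplit1_decomp t]
  rw [h, List.filter_cons]
  simp

-- W: prepending a whitespace char does not change the lstripped normal form
theorem pvW (c : Char) (t : List Char) (hc : PySem.Chars.isspace c = true) :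
    PySem.Chars.lstrip (pvPhi (c :: t)) = PySem.Chars.lstrip (pvPhi t) := by
  by_cases h : c = ' '
  · subst h
    rw [pvPhi, pvPhi, pvF_cons_space]
  · rw [pvPhi, pvPhi, pvF_cons_ne c t h]
    rcases hh : (pvSplit1 t).headI with _ | ⟨x, xs⟩
    · rw [pvF_eq_of_headI_nil t hh]
      rcases hft : List.filter (fun p => !p.isEmpty) (pvSplit1 t).tail with _ | ⟨y, ys⟩
      · rw [hft, pvJ_single, pvJ_nil, pvLstrip_cons, if_pos hc]
      · rw [hft, pvJ_cons_cons]
        simp only [List.cons_append, List.nil_append]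
        rw [pvLstrip_cons, if_pos hc, pvLstrip_cons, if_pos (show PySem.Chars.isspace ' ' = true by decide)]
    · rw [pvF_eq_of_headI_cons t x xs hh, pvJ_cons_head, pvLstrip_cons, if_pos hc]

theorem pvK2a (u : List Char) :
    PySem.Chars.strip (pvPhi (PySem.Chars.lstrip u)) = PySem.Chars.strip (pvPhi u) := by
  induction u with
  | nil => rfl
  | cons c t ih =>
    rw [pvLstrip_cons]
    by_cases hc : PySem.Chars.isspace c
    · rw [if_pos hc, ih, PySem.Chars.strip, PySem.Chars.strip, pvW c t hc]
    · rw [if_neg hc]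

theorem pvK2b (u : List Char) :
    PySem.Chars.strip (pvPhi (PySem.Chars.rstrip u)) = PySem.Chars.strip (pvPhi u) := by
  have h1 : PySem.Chars.rstrip u = (PySem.Chars.lstrip u.reverse).reverse := by
    rw [pvLstrip_reverse, List.reverse_reverse]
  rw [h1, pvPhi_reverse, pvStrip_reverse, pvK2a, pvPhi_reverse, pvStrip_reverse,
    List.reverse_reverse]

theorem pvK2 (u : List Char) :
    PySem.Chars.strip (pvPhi (PySem.Chars.strip u)) = PySem.Chars.strip (pvPhi u) := by
  have h1 : PySem.Chars.strip u = PySem.Chars.rstrip (PySem.Chars.lstrip u) := rfl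
  rw [h1, pvK2b, pvK2a]

-- step invariance of the normal form
theorem pvStepA_eq (s : List Char) : pvStepA s = PySem.Chars.strip (pvRepl2 s) := by
  rw [pvStepA, pvReplace_eq_repl2]

theorem pvNF_step (s : List Char) : pvNF (pvStepA s) = pvNF s := by
  rw [pvStepA_eq, pvNF, pvNF, pvK2, pvPhi_repl2]

-- K3: a string fixed by the loop body is its own normal form
theorem pvRepl2_len (s : List Char) : (pvRepl2 s).length ≤ s.length := by
  induction s using pvRepl2.induct with
  | case1 => simp [pvRepl2]
  | case2 c t h ih =>
    rw [pvRepl2, if_pos h]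
    cases t with
    | nil => simp at h
    | cons d u => simp at ih ⊢; omega
  | case3 c t h ih =>
    rw [pvRepl2, if_neg h]
    simpa using ih

theorem pvHead_of_fix (v : List Char) (h : pvRepl2 (' ' :: v) = ' ' :: v) :
    v.head? ≠ some ' ' ∧ pvRepl2 v = v := by
  cases v with
  | nil => exact ⟨by simp, by simp [pvRepl2]⟩
  | cons d u =>
    by_cases hd : d = ' '
    · subst hd
      rw [pvRepl2, if_pos (by simp)] at h
      simp only [List.tail_cons, List.cons.injEq, true_and] at h
      have := pvRepl2_len u
      have hlen : (pvRepl2 u).length = (' ' :: u).length := by rw [h]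
      simp at hlen; omega
    · rw [pvRepl2, if_neg (by simp [hd])] at h
      simp only [List.cons.injEq, true_and] at h
      exact ⟨by simp [hd], h⟩

theorem pvK3 (n : Nat) : ∀ s : List Char, s.length ≤ n → pvRepl2 s = s →
    s.getLast? ≠ some ' ' →
    pvPhi s = (if s.head? = some ' ' then s.tail else s) := by
  induction n with
  | zero =>
    intro s hlen _ _
    have : s = [] := by cases s <;> simp_all
    subst this
    simp [pvPhi, pvF, pvSplit1, pvJ_nil]
  | succ n ih =>
    intro s hlen hfix hlast
    cases s with
    | nil => simp [pvPhi, pvF, pvSplit1, pvJ_nil]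
    | cons c t =>
      by_cases hc : c = ' '
      · subst hc
        obtain ⟨hh, hfixt⟩ := pvHead_of_fix t hfix
        cases t with
        | nil => simp at hlast
        | cons d u =>
          rw [List.getLast?_cons_cons] at hlast
          have hphit := ih (d :: u) (by simp at hlen ⊢; omega) hfixt hlast
          rw [if_neg (by simpa using hh)] at hphit
          rw [pvPhi, pvF_cons_space]
          rw [show pvJ (pvF (d :: u)) = pvPhi (d :: u) from rfl, hphit]
          simp
      · have hfixt : pvRepl2 t = t := by
          rw [pvRepl2, if_neg (by intro hh; exact hc hh.1)] at hfix
          simpa using hfix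
        cases t with
        | nil =>
          rw [pvPhi, pvF_cons_ne c [] hc]
          rw [show (pvSplit1 ([] : List Char)).headI = [] from rfl,
            show (pvSplit1 ([] : List Char)).tail = [] from rfl]
          rw [List.filter_nil, pvJ_single]
          simp [hc]
        | cons d u =>
          rw [List.getLast?_cons_cons] at hlast
          by_cases hd : d = ' '
          · subst hd
            obtain ⟨hhu, hfixu⟩ := pvHead_of_fix u hfixt
            cases u with
            | nil => simp at hlast
            | cons x v =>
              rw [List.getLast?_cons_cons] at hlast
              have hphiu := ih (x :: v) (by simp at hlen ⊢; omega) hfixu hlast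
              rw [if_neg (by simpa using hhu)] at hphiu
              have hx : ¬ x = ' ' := by simpa using hhu
              rw [pvPhi, pvF_cons_ne c _ hc, pvSplit1_cons_space]
              simp only [List.headI_cons, List.tail_cons]
              rw [show List.filter (fun p => !p.isEmpty) (pvSplit1 (x :: v)) = pvF (x :: v)
                from rfl]
              rw [pvF_cons_ne x v hx]
              rw [pvPhi, pvF_cons_ne x v hx] at hphiu
              rw [pvJ_cons_cons, hphiu]
              simp [hc]
          · have hphit := ih (d :: u) (by simp at hlen ⊢; omega) hfixt hlast
            rw [if_neg (by simpa using hd)] at hphit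
            rw [pvPhi, pvF_cons_ne c _ hc, pvSplit1_cons_ne d u hd]
            simp only [List.headI_cons, List.tail_cons]
            rw [pvJ_cons_head]
            rw [pvPhi, pvF_cons_ne d u hd] at hphit
            rw [hphit]
            simp [hc]

-- a fixed point of the loop body is its own normal form
theorem pvHeadq_of_lstrip (s : List Char) (h : PySem.Chars.lstrip s = s) :
    s.head? ≠ some ' ' := by
  cases s with
  | nil => simp
  | cons c t =>
    intro hh
    simp only [List.head?_cons, Option.some.injEq] at hh
    subst hh
    rw [pvLstrip_cons, if_pos (by decide)] at h
    have := pvLstrip_len t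
    have hlen : (PySem.Chars.lstrip t).length = (' ' :: t).length := by rw [h]
    simp at hlen; omega

theorem pvLastq_of_rstrip (s : List Char) (h : PySem.Chars.rstrip s = s) :
    s.getLast? ≠ some ' ' := by
  intro hl
  obtain ⟨init, hinit⟩ := List.getLast?_eq_some_iff.mp hl
  subst hinit
  have h2 : (PySem.Chars.rstrip (init ++ [' '])).length ≤ init.length := by
    rw [PySem.Chars.rstrip]
    rw [show (init ++ [' ']).reverse = ' ' :: init.reverse by simp]
    rw [List.dropWhile_cons, if_pos (by decide)]
    simpa using List.length_dropWhile_le PySem.Chars.isspace init.reverse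
  rw [h] at h2
  simp at h2

theorem pvStrip_split (s : List Char) (h : PySem.Chars.strip s = s) :
    PySem.Chars.lstrip s = s ∧ PySem.Chars.rstrip s = s := by
  rw [PySem.Chars.strip] at h
  have hl1 : (PySem.Chars.lstrip s).length = s.length := by
    have h1 := pvRstrip_len (PySem.Chars.lstrip s)
    have h2 := pvLstrip_len s
    have h3 : (PySem.Chars.rstrip (PySem.Chars.lstrip s)).length = s.length := by rw [h]
    omega
  have hls := pvLstrip_eq_of_len s hl1
  rw [hls] at h
  exact ⟨hls, h⟩

theorem pvNF_fix (s : List Char) (h : pvStepA s = s) : pvNF s = s := by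
  rw [pvStepA_eq] at h
  have hrep : pvRepl2 s = s := by
    rcases pvReplace_or s with h2 | h2
    · rw [pvReplace_eq_repl2] at h2; exact h2
    · exfalso
      rw [pvReplace_eq_repl2] at h2
      have h3 := pvStrip_len (pvRepl2 s)
      have h4 : (PySem.Chars.strip (pvRepl2 s)).length = s.length := by rw [h]
      omega
  rw [hrep] at h
  obtain ⟨hls, hrs⟩ := pvStrip_split s h
  have hk3 := pvK3 s.length s (le_refl _) hrep (pvLastq_of_rstrip s hrs)
  rw [if_neg (pvHeadq_of_lstrip s hls)] at hk3
  rw [pvNF, hk3, h]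

-- the loop computes the normal form
theorem pvLoop_NF (n : Nat) : ∀ s : List Char, s.length ≤ n →
    pvLoopA s (pvStepA s) = pvNF s := by
  induction n with
  | zero =>
    intro s hlen
    have hs : s = [] := by cases s <;> simp_all
    subst hs
    have hfix : pvStepA ([] : List Char) = [] := by
      rw [pvStepA_eq]; simp [pvRepl2]; rfl
    rw [pvLoopA, if_pos hfix, hfix, pvNF_fix [] hfix]
  | succ n ih =>
    intro s hlen
    rw [pvLoopA]
    by_cases hfix : pvStepA s = s
    · rw [if_pos hfix, hfix, pvNF_fix s hfix]
    · rw [if_neg hfix, ih (pvStepA s) (by have := pvStepA_lt s hfix; omega), pvNF_step]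

theorem pvStage1 (s : List Char) : pvLoopA [] s = pvNF s := by
  by_cases hs : s = []
  · subst hs
    rw [pvLoopA, if_pos rfl]
    have hfix : pvStepA ([] : List Char) = [] := by
      rw [pvStepA_eq]; simp [pvRepl2]; rfl
    rw [pvNF_fix [] hfix]
  · rw [pvLoopA, if_neg hs]
    exact pvLoop_NF s.length s (le_refl _)

-- the '.00' tests of the two ports agree
theorem pvTest_iff (f : List Char) :
    PySem.Chars.slice f (some (-3)) none = ".00".toList ↔
      PySem.Chars.endswith f ".00".toList = true := by
  rw [PySem.Chars.slice_eq_listSlice, PySem.List.slice_from_neg_ofNat f 3 (by omega),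
    PySem.Chars.endswith_iff]
  constructor
  · intro h
    rw [← h]
    exact List.drop_suffix _ _
  · intro h
    have hlen : (".00".toList).length = 3 := by decide
    have := List.suffix_iff_eq_drop.mp h
    rw [hlen] at this
    exact this.symm

-- B's first stage is the same normal form
theorem pvStage1B (s : List Char) :
    PySem.Chars.strip (PySem.Chars.join " ".toList
      ((PySem.Chars.splitOn s " ".toList).filter (fun p => !p.isEmpty))) = pvNF s := by
  rw [pvSplitOn_eq_split1]
  rfl

-- ===== VERDICT (by name: the statement is the Claim_ definition above) =====
theorem MakePWDRfilename_spec : Claim_equal_MakePWDRfilename := by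
  intro hist _
  unfold Spec_MakePWDRfilename MakePWDRfilename MakePWDRfilename_alt
  simp only [pvStage1, pvStage1B]
  by_cases hcond : PySem.Chars.slice
      (PySem.Chars.replace (pvNF (PySem.Chars.slice hist.toList (some 5) none))
        "Azm= ".toList "A".toList) (some (-3)) none = ".00".toList
  · rw [if_pos hcond, if_pos ((pvTest_iff _).mp hcond)]
  · rw [if_neg hcond, if_neg (fun h => hcond ((pvTest_iff _).mpr h))]
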